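-- pv_equiv track=rewrite | github.com/cern-cta/CTA | continuousintegration/sbom/prune_sbom.py | find_reachable_components
-- ===== SOURCE A (Python) =====
-- from collections import deque
--
-- def find_reachable_components(root_component: str, ref2deps: dict[str, list[str]]) -> set[str]:
--     reachable_refs: set[str] = set([root_component])
--     q = deque([root_component])
--     while q:
--         ref = q.popleft()
--         for dep in ref2deps.get(ref, []):
--             if dep not in reachable_refs:
--                 reachable_refs.add(dep)
--                 q.append(dep)
--     return reachable_refs
-- ===== SOURCE B (Python) =====
-- def find_reachable_components(root_component: str, ref2deps: dict[str, list[str]]) -> set[str]: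
--     reachable: set[str] = {root_component}
--     changed = True
--     while changed:
--         changed = False
--         for ref in list(reachable):
--             for dep in ref2deps.get(ref, []):
--                 if dep not in reachable:
--                     reachable.add(dep)
--                     changed = True
--     return reachable
-- ===== Notes on version B (the rewrite author's own statement) =====
-- stated objective: alternative
-- what changed: The queue-driven BFS (deque worklist, one node popped per step) is replaced by a worklist-free fixpoint iteration: repeatedly rescan every currently-reachable ref and add its missing deps until a full pass adds nothing.
import Mathlib
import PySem

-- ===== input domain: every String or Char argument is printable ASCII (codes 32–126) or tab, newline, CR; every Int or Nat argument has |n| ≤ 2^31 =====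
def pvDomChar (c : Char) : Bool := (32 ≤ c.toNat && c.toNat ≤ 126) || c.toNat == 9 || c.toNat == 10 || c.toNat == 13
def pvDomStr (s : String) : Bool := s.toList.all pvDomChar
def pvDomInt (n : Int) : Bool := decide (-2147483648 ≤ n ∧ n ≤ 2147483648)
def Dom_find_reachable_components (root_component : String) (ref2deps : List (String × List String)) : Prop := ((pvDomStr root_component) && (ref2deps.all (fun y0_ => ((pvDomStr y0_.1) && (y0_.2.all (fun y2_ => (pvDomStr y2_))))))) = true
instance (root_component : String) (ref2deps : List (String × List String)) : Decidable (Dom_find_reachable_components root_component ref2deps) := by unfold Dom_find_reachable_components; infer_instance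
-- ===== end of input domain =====

-- B replaces A's queue-driven BFS by a repeated full-scan-to-fixpoint loop (objective: alternative
-- decomposition, same return value; not faster).

-- shared context: `ref2deps.get(ref, [])` (both Pythons perform this same dict lookup)
def pvDeps (ref2deps : List (String × List String)) (ref : String) : List String :=
  PySem.Dict.getD (PySem.Dict.mk ref2deps) ref []

-- the set of strings any run can ever contain (for termination only)
def pvUniv (root_component : String) (ref2deps : List (String × List String)) : List String :=
  root_component :: ref2deps.flatMap (·.2)

-- every dep returned by the lookup lives in pvUniv (cited by the ports' termination proofs)
theorem pvDeps_subset_univ (root_component : String) (ref2deps : List (String × List String))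
    (ref x : String) (hx : x ∈ pvDeps ref2deps ref) : x ∈ pvUniv root_component ref2deps := by
  unfold pvDeps at hx
  rw [PySem.Dict.getD_eq_get?_getD] at hx
  cases hget : (PySem.Dict.mk ref2deps).get? ref with
  | none => rw [hget] at hx; simp at hx
  | some v =>
    rw [hget] at hx
    simp only [Option.getD_some] at hx
    have hmem : (ref, v) ∈ ref2deps :=
      PySem.Dict.mem_items_of_get?_eq_some (d := PySem.Dict.mk ref2deps) hget
    exact List.mem_cons_of_mem _ (List.mem_flatMap.mpr ⟨(ref, v), hmem, hx⟩)

-- abstract one-element processing on the set alone (proof vocabulary shared by the lemmas below)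
def pvPassS (get : String → List String) (r : PySem.Set String) (l : List String) : PySem.Set String :=
  l.foldl (fun r x => PySem.Set.update r (get x)) r

theorem pv_mem_of_contains {s : PySem.Set String} {x : String}
    (h : PySem.Set.contains s x = true) : x ∈ s := (PySem.Set.contains_iff s x).1 h

theorem pv_not_mem_of_contains_eq_false {s : PySem.Set String} {x : String}
    (h : PySem.Set.contains s x = false) : x ∉ s := fun hm => by
  rw [(PySem.Set.contains_iff s x).2 hm] at h; cases h

-- ===== PORT A =====
-- inner `for dep in ref2deps.get(ref, [])` loop of A over the state (reachable_refs, q)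
def pvInnerA (ds : List String) (st : PySem.Set String × List String) :
    PySem.Set String × List String :=
  ds.foldl (fun st dep =>
    if PySem.Set.contains st.1 dep = false then (PySem.Set.add st.1 dep, st.2 ++ [dep]) else st) st

theorem pvInnerA_fst (ds : List String) (st : PySem.Set String × List String) :
    (pvInnerA ds st).1 = PySem.Set.update st.1 ds := by
  induction ds generalizing st with
  | nil => rfl
  | cons dep rest ih =>
    simp only [pvInnerA, List.foldl_cons, PySem.Set.update] at *
    by_cases h : PySem.Set.contains st.1 dep = false
    · simp only [h, if_true, ih]
    · simp only [h, if_false, ih]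
      simp only [Bool.not_eq_false] at h
      simp [PySem.Set.add, pv_mem_of_contains h]

theorem pvInnerA_snd (ds : List String) (r : PySem.Set String) (q : List String) :
    (pvInnerA ds (r, q)).2 = q ++ ((pvInnerA ds (r, q)).1).drop r.length := by
  induction ds generalizing r q with
  | nil => simp [pvInnerA]
  | cons dep rest ih =>
    simp only [pvInnerA, List.foldl_cons] at *
    by_cases h : PySem.Set.contains r dep = false
    · have hadd : PySem.Set.add r dep = r ++ [dep] := by
        simp [PySem.Set.add, pv_not_mem_of_contains_eq_false h]
      simp only [h, if_true, hadd]
      rw [ih]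
      obtain ⟨t, ht⟩ : ∃ t, (pvInnerA rest (r ++ [dep], q ++ [dep])).1 = (r ++ [dep]) ++ t := by
        rw [pvInnerA_fst]
        exact ⟨_, PySem.Set.update_eq_append_filter _ _⟩
      simp only [pvInnerA] at ht
      have d1 : ((r ++ [dep]) ++ t).drop (r ++ [dep]).length = t := List.drop_left
      have d2 : ((r ++ [dep]) ++ t).drop r.length = [dep] ++ t := by
        rw [List.append_assoc]; exact List.drop_left
      rw [ht, d1, d2, List.append_assoc]
    · simp only [h, if_false]
      exact ih r q

theorem pvInnerA_length_le (ds : List String) (r : PySem.Set String) (q : List String) :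
    r.length ≤ (pvInnerA ds (r, q)).1.length := by
  rw [pvInnerA_fst, PySem.Set.update_eq_append_filter]
  simp

-- outer `while q:` loop of A; univ/hcl/hnd/hsub only make the recursion well-founded
def pvLoopA (get : String → List String) (univ : List String)
    (hcl : ∀ ref x, x ∈ get ref → x ∈ univ)
    (r : PySem.Set String) (q : List String)
    (hnd : r.Nodup) (hsub : ∀ x ∈ r, x ∈ univ) : List String :=
  match q with
  | [] => r
  | ref :: rest =>
    pvLoopA get univ hcl (pvInnerA (get ref) (r, rest)).1 (pvInnerA (get ref) (r, rest)).2
      (by rw [pvInnerA_fst]; exact PySem.Set.nodup_update r (get ref) hnd)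
      (by
        intro x hx
        rw [pvInnerA_fst] at hx
        rcases (PySem.Set.mem_update r (get ref) x).1 hx with h | h
        · exact hsub x h
        · exact hcl ref x h)
termination_by 2 * (univ.length - r.length) + q.length
decreasing_by
  have h1 : r.length ≤ (pvInnerA (get ref) (r, rest)).1.length := pvInnerA_length_le _ _ _
  have h2 : (pvInnerA (get ref) (r, rest)).1.length ≤ univ.length := by
    apply (List.subperm_of_subset _ _).length_le
    · rw [pvInnerA_fst]; exact PySem.Set.nodup_update r (get ref) hnd
    · intro x hx
      rw [pvInnerA_fst] at hx
      rcases (PySem.Set.mem_update r (get ref) x).1 hx with h | h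
      · exact hsub x h
      · exact hcl ref x h
  have h3 : (pvInnerA (get ref) (r, rest)).2.length
      = rest.length + ((pvInnerA (get ref) (r, rest)).1.length - r.length) := by
    rw [pvInnerA_snd]
    simp [List.length_drop]
  simp only [List.length_cons]
  omega

def find_reachable_components (root_component : String) (ref2deps : List (String × List String)) :
    List String :=
  pvLoopA (pvDeps ref2deps) (pvUniv root_component ref2deps)
    (fun ref x hx => pvDeps_subset_univ root_component ref2deps ref x hx)
    [root_component] [root_component]
    (List.nodup_singleton _)
    (fun x hx => by simpa [pvUniv] using Or.inl (List.mem_singleton.mp hx))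

-- ===== PORT B =====
-- inner `for dep in ref2deps.get(ref, [])` loop of B over the state (reachable, changed)
def pvInnerB (ds : List String) (st : PySem.Set String × Bool) : PySem.Set String × Bool :=
  ds.foldl (fun st dep =>
    if PySem.Set.contains st.1 dep = false then (PySem.Set.add st.1 dep, true) else st) st

-- one full `for ref in list(reachable):` scan of B
def pvPassB (get : String → List String) (st : PySem.Set String × Bool)
    (snapshot : List String) : PySem.Set String × Bool :=
  snapshot.foldl (fun st ref => pvInnerB (get ref) st) st

theorem pvInnerB_fst (ds : List String) (st : PySem.Set String × Bool) :
    (pvInnerB ds st).1 = PySem.Set.update st.1 ds := by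
  induction ds generalizing st with
  | nil => rfl
  | cons dep rest ih =>
    simp only [pvInnerB, List.foldl_cons, PySem.Set.update] at *
    by_cases h : PySem.Set.contains st.1 dep = false
    · simp only [h, if_true, ih]
    · simp only [h, if_false, ih]
      simp only [Bool.not_eq_false] at h
      simp [PySem.Set.add, pv_mem_of_contains h]

theorem pvInnerB_snd (ds : List String) (st : PySem.Set String × Bool) :
    (pvInnerB ds st).2
      = (st.2 || decide (st.1.length < (PySem.Set.update st.1 ds).length)) := by
  induction ds generalizing st with
  | nil => simp [pvInnerB, PySem.Set.update]
  | cons dep rest ih =>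
    simp only [pvInnerB, List.foldl_cons, PySem.Set.update, List.foldl_cons] at *
    by_cases h : PySem.Set.contains st.1 dep = false
    · have hadd : PySem.Set.add st.1 dep = st.1 ++ [dep] := by
        simp [PySem.Set.add, pv_not_mem_of_contains_eq_false h]
      simp only [h, if_true, ih, hadd]
      have hlen : st.1.length < (PySem.Set.update (st.1 ++ [dep]) rest).length := by
        rw [PySem.Set.update_eq_append_filter]
        simp
      simp only [PySem.Set.update] at hlen
      simp [hlen]
    · simp only [Bool.not_eq_false] at h
      have hadd : PySem.Set.add st.1 dep = st.1 := by
        simp [PySem.Set.add, pv_mem_of_contains h]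
      have hc : ¬ (PySem.Set.contains st.1 dep = false) := by rw [h]; simp
      rw [if_neg hc, ih st]
      simp only [hadd]
      rfl

theorem pvPassB_fst (get : String → List String) (st : PySem.Set String × Bool)
    (l : List String) : (pvPassB get st l).1 = pvPassS get st.1 l := by
  induction l generalizing st with
  | nil => rfl
  | cons x rest ih =>
    simp only [pvPassB, pvPassS, List.foldl_cons] at *
    rw [ih, pvInnerB_fst]

theorem pvPassS_prefix (get : String → List String) (r : PySem.Set String) (l : List String) :
    ∃ t, pvPassS get r l = r ++ t := by
  induction l generalizing r with
  | nil => exact ⟨[], by simp [pvPassS]⟩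
  | cons x rest ih =>
    obtain ⟨t2, ht2⟩ := ih (PySem.Set.update r (get x))
    refine ⟨(PySem.Set.ofList (get x)).filter (fun y => !(PySem.Set.contains r y)) ++ t2, ?_⟩
    simp only [pvPassS, List.foldl_cons] at *
    rw [ht2, PySem.Set.update_eq_append_filter, List.append_assoc]

theorem pvPassS_length_le (get : String → List String) (r : PySem.Set String) (l : List String) :
    r.length ≤ (pvPassS get r l).length := by
  obtain ⟨t, ht⟩ := pvPassS_prefix get r l
  simp [ht]

theorem pvPassS_nodup (get : String → List String) (r : PySem.Set String) (l : List String)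
    (hnd : r.Nodup) : (pvPassS get r l).Nodup := by
  induction l generalizing r with
  | nil => exact hnd
  | cons x rest ih =>
    exact ih _ (PySem.Set.nodup_update r (get x) hnd)

theorem pvPassS_mem (get : String → List String) (r : PySem.Set String) (l : List String)
    (x : String) (hx : x ∈ pvPassS get r l) : x ∈ r ∨ ∃ ref, x ∈ get ref := by
  induction l generalizing r with
  | nil => exact Or.inl hx
  | cons a rest ih =>
    rcases ih _ hx with h | h
    · rcases (PySem.Set.mem_update r (get a) x).1 h with h' | h'
      · exact Or.inl h'
      · exact Or.inr ⟨a, h'⟩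
    · exact Or.inr h

theorem pvPassB_snd (get : String → List String) (st : PySem.Set String × Bool)
    (l : List String) :
    (pvPassB get st l).2 = (st.2 || decide (st.1.length < (pvPassB get st l).1.length)) := by
  induction l generalizing st with
  | nil => simp [pvPassB]
  | cons a rest ih =>
    simp only [pvPassB, List.foldl_cons] at *
    rw [ih, pvInnerB_snd, pvInnerB_fst, Bool.or_assoc]
    congr 1
    rw [← Bool.decide_or]
    have h1 : st.1.length ≤ (PySem.Set.update st.1 (get a)).length := by
      rw [PySem.Set.update_eq_append_filter]; simp
    have h2 : (PySem.Set.update st.1 (get a)).length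
        ≤ (rest.foldl (fun st ref => pvInnerB (get ref) st) (pvInnerB (get a) st)).1.length := by
      have := pvPassS_length_le get (PySem.Set.update st.1 (get a)) rest
      have hf := pvPassB_fst get (pvInnerB (get a) st) rest
      simp only [pvPassB, pvInnerB_fst] at hf
      rw [hf]
      exact this
    exact decide_eq_decide.mpr (by omega)

-- outer `while changed:` loop of B; univ/hcl/hnd/hsub only make the recursion well-founded
def pvLoopB (get : String → List String) (univ : List String)
    (hcl : ∀ ref x, x ∈ get ref → x ∈ univ)
    (r : PySem.Set String)
    (hnd : r.Nodup) (hsub : ∀ x ∈ r, x ∈ univ) : List String :=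
  if h : (pvPassB get (r, false) r).2 = true then
    pvLoopB get univ hcl (pvPassB get (r, false) r).1
      (by rw [pvPassB_fst]; exact pvPassS_nodup get r r hnd)
      (by
        intro x hx
        rw [pvPassB_fst] at hx
        rcases pvPassS_mem get r r x hx with h | ⟨ref, hd⟩
        · exact hsub x h
        · exact hcl ref x hd)
  else
    (pvPassB get (r, false) r).1
termination_by univ.length - r.length
decreasing_by
  rw [pvPassB_snd] at h
  simp only [Bool.false_or, decide_eq_true_eq] at h
  have h2 : (pvPassB get (r, false) r).1.length ≤ univ.length := by
    apply (List.subperm_of_subset _ _).length_le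
    · rw [pvPassB_fst]; exact pvPassS_nodup get r r hnd
    · intro x hx
      rw [pvPassB_fst] at hx
      rcases pvPassS_mem get r r x hx with hh | ⟨ref, hd⟩
      · exact hsub x hh
      · exact hcl ref x hd
  omega

def find_reachable_components_alt (root_component : String)
    (ref2deps : List (String × List String)) : List String :=
  pvLoopB (pvDeps ref2deps) (pvUniv root_component ref2deps)
    (fun ref x hx => pvDeps_subset_univ root_component ref2deps ref x hx)
    [root_component]
    (List.nodup_singleton _)
    (fun x hx => by simpa [pvUniv] using Or.inl (List.mem_singleton.mp hx))

-- ===== PRECONDITION & SPEC =====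
def Spec_find_reachable_components (root_component : String) (ref2deps : List (String × List String)) (out : List String) : Prop := out = find_reachable_components_alt root_component ref2deps
instance (root_component : String) (ref2deps : List (String × List String)) (out : List String) : Decidable (Spec_find_reachable_components root_component ref2deps out) := by unfold Spec_find_reachable_components; infer_instance

-- ===== CLAIM (what is proved, stated in full; the proofs are below) =====
def Claim_equal_find_reachable_components : Prop := ∀ (root_component : String) (ref2deps : List (String × List String)), Dom_find_reachable_components root_component ref2deps → Spec_find_reachable_components root_component ref2deps (find_reachable_components root_component ref2deps)

-- ===== LEMMAS AND PROOFS =====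

theorem pvPassS_mem_left (get : String → List String) (r : PySem.Set String) (l : List String)
    (x : String) (hx : x ∈ r) : x ∈ pvPassS get r l := by
  obtain ⟨t, ht⟩ := pvPassS_prefix get r l
  rw [ht]
  exact List.mem_append_left _ hx


theorem pvLoopA_nil (get : String → List String) (univ : List String)
    (hcl : ∀ ref x, x ∈ get ref → x ∈ univ) (r : PySem.Set String)
    (hnd : r.Nodup) (hsub : ∀ x ∈ r, x ∈ univ) :
    pvLoopA get univ hcl r [] hnd hsub = r := by
  rw [pvLoopA]

theorem pvLoopA_cons (get : String → List String) (univ : List String)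
    (hcl : ∀ ref x, x ∈ get ref → x ∈ univ) (ref : String) (rest : List String)
    (r : PySem.Set String) (hnd : r.Nodup) (hsub : ∀ x ∈ r, x ∈ univ)
    (h1 : (pvInnerA (get ref) (r, rest)).1.Nodup)
    (h2 : ∀ x ∈ (pvInnerA (get ref) (r, rest)).1, x ∈ univ) :
    pvLoopA get univ hcl r (ref :: rest) hnd hsub
      = pvLoopA get univ hcl (pvInnerA (get ref) (r, rest)).1 (pvInnerA (get ref) (r, rest)).2 h1 h2 := by
  rw [pvLoopA]

theorem pvLoopB_of_unchanged (get : String → List String) (univ : List String)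
    (hcl : ∀ ref x, x ∈ get ref → x ∈ univ) (r : PySem.Set String)
    (hnd : r.Nodup) (hsub : ∀ x ∈ r, x ∈ univ)
    (h : (pvPassB get (r, false) r).2 = false) :
    pvLoopB get univ hcl r hnd hsub = (pvPassB get (r, false) r).1 := by
  rw [pvLoopB, dif_neg (by simp [h])]

theorem pvLoopB_of_changed (get : String → List String) (univ : List String)
    (hcl : ∀ ref x, x ∈ get ref → x ∈ univ) (r r' : PySem.Set String)
    (hnd : r.Nodup) (hsub : ∀ x ∈ r, x ∈ univ)
    (h : (pvPassB get (r, false) r).2 = true)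
    (hr' : (pvPassB get (r, false) r).1 = r')
    (h1 : r'.Nodup) (h2 : ∀ x ∈ r', x ∈ univ) :
    pvLoopB get univ hcl r hnd hsub = pvLoopB get univ hcl r' h1 h2 := by
  subst hr'
  rw [pvLoopB, dif_pos h]

theorem pvPassS_append (get : String → List String) (r : PySem.Set String)
    (l1 l2 : List String) :
    pvPassS get r (l1 ++ l2) = pvPassS get (pvPassS get r l1) l2 := by
  simp [pvPassS, List.foldl_append]

theorem pvPassS_sat (get : String → List String) (l : List String) (r : PySem.Set String)
    (x : String) (hx : x ∈ l) (d : String) (hd : d ∈ get x) : d ∈ pvPassS get r l := by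
  induction l generalizing r with
  | nil => cases hx
  | cons a rest ih =>
    rcases List.mem_cons.1 hx with rfl | hx'
    · exact pvPassS_mem_left get _ rest d ((PySem.Set.mem_update r (get x) d).2 (Or.inr hd))
    · exact ih _ hx'

theorem pvPassS_of_sat (get : String → List String) (l : List String) (r : PySem.Set String)
    (h : ∀ x ∈ l, ∀ d ∈ get x, d ∈ r) : pvPassS get r l = r := by
  induction l with
  | nil => rfl
  | cons a rest ih =>
    have hu : PySem.Set.update r (get a) = r := by
      rw [PySem.Set.update_eq_append_filter]
      have hfil : (PySem.Set.ofList (get a)).filter (fun y => !(PySem.Set.contains r y)) = [] := by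
        rw [List.filter_eq_nil_iff]
        intro y hy
        have hyg : y ∈ get a := (PySem.Set.mem_ofList (get a) y).1 hy
        have hc : PySem.Set.contains r y = true :=
          (PySem.Set.contains_iff r y).2 (h a (by simp) y hyg)
        simp [pv_mem_of_contains hc]
      rw [hfil, List.append_nil]
    show pvPassS get (PySem.Set.update r (get a)) rest = r
    rw [hu]
    exact ih (fun x hx => h x (List.mem_cons_of_mem _ hx))

theorem pvLoopA_round (get : String → List String) (univ : List String)
    (hcl : ∀ ref x, x ∈ get ref → x ∈ univ) :
    ∀ (q tail r : List String) (hnd : r.Nodup) (hsub : ∀ x ∈ r, x ∈ univ)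
      (hnd' : (pvPassS get r q).Nodup) (hsub' : ∀ x ∈ pvPassS get r q, x ∈ univ),
      pvLoopA get univ hcl r (q ++ tail) hnd hsub
        = pvLoopA get univ hcl (pvPassS get r q)
            (tail ++ (pvPassS get r q).drop r.length) hnd' hsub' := by
  intro q
  induction q with
  | nil =>
    intro tail r hnd hsub hnd' hsub'
    simp only [List.nil_append, pvPassS, List.foldl_nil, List.drop_length, List.append_nil]
  | cons a q' ih =>
    intro tail r hnd hsub hnd' hsub'
    have hu0nd : (PySem.Set.update r (get a)).Nodup := PySem.Set.nodup_update r (get a) hnd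
    have hu0sub : ∀ x ∈ PySem.Set.update r (get a), x ∈ univ := by
      intro x hx
      rcases (PySem.Set.mem_update r (get a) x).1 hx with hh | hh
      · exact hsub x hh
      · exact hcl a x hh
    rw [List.cons_append,
      pvLoopA_cons get univ hcl a (q' ++ tail) r hnd hsub
        (by rw [pvInnerA_fst]; exact hu0nd)
        (by intro x hx; rw [pvInnerA_fst] at hx; exact hu0sub x hx)]
    have hfst : (pvInnerA (get a) (r, q' ++ tail)).1 = PySem.Set.update r (get a) :=
      pvInnerA_fst (get a) (r, q' ++ tail)
    -- the fresh elements appended by processing `a`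
    obtain ⟨n1, hn1⟩ : ∃ n1, PySem.Set.update r (get a) = r ++ n1 :=
      ⟨_, PySem.Set.update_eq_append_filter r (get a)⟩
    have hdrop1 : (PySem.Set.update r (get a)).drop r.length = n1 := by
      rw [hn1]; exact List.drop_left
    have hsnd : (pvInnerA (get a) (r, q' ++ tail)).2 = q' ++ (tail ++ n1) := by
      rw [pvInnerA_snd, hfst, hdrop1, List.append_assoc]
    have step :
        pvLoopA get univ hcl (pvInnerA (get a) (r, q' ++ tail)).1
            (pvInnerA (get a) (r, q' ++ tail)).2
            (by rw [pvInnerA_fst]; exact hu0nd)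
            (by intro x hx; rw [pvInnerA_fst] at hx; exact hu0sub x hx)
          = pvLoopA get univ hcl (PySem.Set.update r (get a)) (q' ++ (tail ++ n1))
              hu0nd hu0sub := by
      congr 1 <;> first | rw [hfst] | rw [hsnd]
    rw [step]
    have hP : pvPassS get r (a :: q') = pvPassS get (PySem.Set.update r (get a)) q' := rfl
    have hnd'' : (pvPassS get (PySem.Set.update r (get a)) q').Nodup := by rw [← hP]; exact hnd'
    have hsub'' : ∀ x ∈ pvPassS get (PySem.Set.update r (get a)) q', x ∈ univ := by
      rw [← hP]; exact hsub'
    rw [ih (tail ++ n1) (PySem.Set.update r (get a)) hu0nd hu0sub hnd'' hsub'']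
    obtain ⟨t2, ht2⟩ := pvPassS_prefix get (PySem.Set.update r (get a)) q'
    have e1 : (pvPassS get (PySem.Set.update r (get a)) q').drop
        (PySem.Set.update r (get a)).length = t2 := by
      rw [ht2]; exact List.drop_left
    have e2 : (pvPassS get (PySem.Set.update r (get a)) q').drop r.length = n1 ++ t2 := by
      rw [ht2, hn1, List.append_assoc]; exact List.drop_left
    congr 1
    rw [e1, hP, e2, ← List.append_assoc]

theorem pvLoop_main (get : String → List String) (univ : List String)
    (hcl : ∀ ref x, x ∈ get ref → x ∈ univ) :
    ∀ (n : Nat) (r : List String) (k : Nat) (hnd : r.Nodup) (hsub : ∀ x ∈ r, x ∈ univ),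
      univ.length - r.length ≤ n →
      (∀ x ∈ r.take k, ∀ d ∈ get x, d ∈ r) →
      pvLoopA get univ hcl r (r.drop k) hnd hsub = pvLoopB get univ hcl r hnd hsub := by
  intro n
  induction n using Nat.strong_induction_on with
  | _ n ihn =>
  intro r k hnd hsub hn hsat
  have hsplit : pvPassS get r r = pvPassS get r (r.drop k) := by
    calc pvPassS get r r = pvPassS get r (r.take k ++ r.drop k) := by
          rw [List.take_append_drop]
      _ = pvPassS get (pvPassS get r (r.take k)) (r.drop k) := pvPassS_append get r _ _
      _ = pvPassS get r (r.drop k) := by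
          rw [pvPassS_of_sat get (r.take k) r hsat]
  obtain ⟨t, ht⟩ := pvPassS_prefix get r (r.drop k)
  have hund : (pvPassS get r (r.drop k)).Nodup := pvPassS_nodup get r _ hnd
  have husub : ∀ x ∈ pvPassS get r (r.drop k), x ∈ univ := by
    intro x hx
    rcases pvPassS_mem get r _ x hx with hh | ⟨ref, hd⟩
    · exact hsub x hh
    · exact hcl ref x hd
  have hBfst : (pvPassB get (r, false) r).1 = pvPassS get r (r.drop k) := by
    rw [pvPassB_fst]; exact hsplit
  have hBsnd : (pvPassB get (r, false) r).2
      = decide (r.length < (pvPassS get r (r.drop k)).length) := by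
    rw [pvPassB_snd, hBfst]; simp
  have hround := pvLoopA_round get univ hcl (r.drop k) [] r hnd hsub hund husub
  rw [List.append_nil, List.nil_append] at hround
  by_cases hchg : t = []
  · have hur : pvPassS get r (r.drop k) = r := by rw [ht, hchg, List.append_nil]
    have hfalse : (pvPassB get (r, false) r).2 = false := by
      rw [hBsnd, hur]; simp
    rw [pvLoopB_of_unchanged get univ hcl r hnd hsub hfalse, hBfst, hur, hround]
    have step : pvLoopA get univ hcl (pvPassS get r (r.drop k))
        ((pvPassS get r (r.drop k)).drop r.length) hund husub
          = pvLoopA get univ hcl r [] hnd hsub := by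
      congr 1 <;> rw [hur] <;> exact List.drop_length
    rw [step, pvLoopA_nil]
  · have hlt : r.length < (pvPassS get r (r.drop k)).length := by
      rw [ht, List.length_append]
      have := List.length_pos_iff.mpr hchg
      omega
    have htrue : (pvPassB get (r, false) r).2 = true := by
      rw [hBsnd]; simp [hlt]
    rw [pvLoopB_of_changed get univ hcl r (pvPassS get r (r.drop k)) hnd hsub htrue hBfst
      hund husub, hround]
    have hulen : (pvPassS get r (r.drop k)).length ≤ univ.length :=
      (List.subperm_of_subset hund (fun x hx => husub x hx)).length_le
    have hsat' : ∀ x ∈ (pvPassS get r (r.drop k)).take r.length, ∀ d ∈ get x,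
        d ∈ pvPassS get r (r.drop k) := by
      intro x hx d hd
      rw [ht, List.take_left] at hx
      rw [← List.take_append_drop k r] at hx
      rcases List.mem_append.1 hx with hx' | hx'
      · have hdr : d ∈ r := hsat x hx' d hd
        rw [ht]; exact List.mem_append_left _ hdr
      · exact pvPassS_sat get (r.drop k) r x hx' d hd
    exact ihn (univ.length - (pvPassS get r (r.drop k)).length) (by omega)
      (pvPassS get r (r.drop k)) r.length hund husub (by omega) hsat'

-- ===== VERDICT (by name: the statement is the Claim_ definition above) =====
theorem find_reachable_components_spec : Claim_equal_find_reachable_components := by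
  unfold Claim_equal_find_reachable_components
  intro root_component ref2deps _
  unfold Spec_find_reachable_components find_reachable_components find_reachable_components_alt
  exact pvLoop_main (pvDeps ref2deps) (pvUniv root_component ref2deps)
    (fun ref x hx => pvDeps_subset_univ root_component ref2deps ref x hx)
    (pvUniv root_component ref2deps).length [root_component] 0
    (List.nodup_singleton _)
    (fun x hx => by simpa [pvUniv] using Or.inl (List.mem_singleton.mp hx))
    (by omega)
    (by intro x hx; simp at hx)
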